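-- pv_equiv track=rewrite | github.com/jacekjursza/CodeHem | codehem/languages/lang_python/components/post_processor.py | _build_decorator_lookup
-- ===== SOURCE A (Python) =====
-- from typing import Any, Dict, List, Optional, Tuple, Union
--
-- def _build_decorator_lookup(decorators: Optional[List[Dict]]) -> Dict[str, List[Dict]]:
--     """
--     Build a lookup dictionary for decorators based on the parent name.
--
--     Args:
--         decorators: List of raw decorator dictionaries
--
--     Returns:
--         Dictionary mapping parent names to lists of decorators
--     """
--     result = {}
--     if not decorators:
--         return result
--
--     for dec in decorators:
--         if not isinstance(dec, dict):
--             continue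
--
--         parent = dec.get("parent_name")
--         if not parent:
--             continue
--
--         if parent not in result:
--             result[parent] = []
--
--         result[parent].append(dec)
--
--     return result
-- ===== SOURCE B (Python) =====
-- def _build_decorator_lookup(decorators):
--     if not decorators:
--         return {}
--     valid = [d for d in decorators
--              if isinstance(d, dict) and d.get("parent_name")]
--     keys = list(dict.fromkeys(d["parent_name"] for d in valid))
--     return {k: [d for d in valid if d["parent_name"] == k] for k in keys}
-- ===== Notes on version B (the rewrite author's own statement) =====
-- stated objective: alternative
-- what changed: Replaces A's imperative loop that mutates a dict (create-key-then-append per element) with a declarative pipeline: filter the valid decorators once, take the ordered distinct parent names, and build each group with a per-key filter comprehension.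
import Mathlib
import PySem

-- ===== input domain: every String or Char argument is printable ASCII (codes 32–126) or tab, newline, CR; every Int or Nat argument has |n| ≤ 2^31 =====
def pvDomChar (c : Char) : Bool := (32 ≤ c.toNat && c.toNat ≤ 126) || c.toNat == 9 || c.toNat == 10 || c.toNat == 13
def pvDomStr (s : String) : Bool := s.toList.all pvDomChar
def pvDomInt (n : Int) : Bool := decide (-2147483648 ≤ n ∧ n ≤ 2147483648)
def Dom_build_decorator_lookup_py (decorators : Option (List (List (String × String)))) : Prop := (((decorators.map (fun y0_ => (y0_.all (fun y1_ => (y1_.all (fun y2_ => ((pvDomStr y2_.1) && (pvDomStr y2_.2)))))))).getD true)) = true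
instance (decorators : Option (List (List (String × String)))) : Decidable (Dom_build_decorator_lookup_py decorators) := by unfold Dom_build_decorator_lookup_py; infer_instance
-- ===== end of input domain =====

-- B groups the decorators declaratively (ordered distinct keys + one filter per key) instead of
-- A's imperative dict-mutation loop; objective: alternative decomposition, not speed.

-- ===== PORT A =====
-- dec.get("parent_name") on the decorator dict
def pvGetPN (dec : List (String × String)) : Option String :=
  (PySem.Dict.mk dec).get? "parent_name"

def build_decorator_lookup_py (decorators : Option (List (List (String × String)))) : List (String × List (List (String × String))) :=
  match decorators with
  | none => []
  | some ds =>
    if ds = [] then [] else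
      (ds.foldl
        (fun result dec =>
          match pvGetPN dec with
          | none => result
          | some p =>
            if p = "" then result
            else
              let result := if result.contains p = false then result.insert p ([] : List (List (String × String))) else result
              result.modify p [] (fun l => l ++ [dec]))
        PySem.Dict.empty).items

-- ===== PORT B =====
-- d["parent_name"] for a valid decorator (dec.get with default, used only where it exists)
def pvKey (dec : List (String × String)) : String := (pvGetPN dec).getD ""

-- the filter predicate of Source B: isinstance is always true under the type convention
def pvValid (dec : List (String × String)) : Bool :=
  match pvGetPN dec with
  | some p => !(p == "")
  | none => false

def build_decorator_lookup_py_alt (decorators : Option (List (List (String × String)))) : List (String × List (List (String × String))) :=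
  match decorators with
  | none => []
  | some ds =>
    if ds = [] then [] else
      let valid := ds.filter pvValid
      let keys := PySem.List.dedup (valid.map pvKey)
      keys.map (fun k => (k, valid.filter (fun d => pvKey d == k)))

-- ===== PRECONDITION & SPEC =====
def Spec_build_decorator_lookup_py (decorators : Option (List (List (String × String)))) (out : List (String × List (List (String × String)))) : Prop := out = build_decorator_lookup_py_alt decorators
instance (decorators : Option (List (List (String × String)))) (out : List (String × List (List (String × String)))) : Decidable (Spec_build_decorator_lookup_py decorators out) := by unfold Spec_build_decorator_lookup_py; infer_instance

-- ===== CLAIM (what is proved, stated in full; the proofs are below) =====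
def Claim_equal_build_decorator_lookup_py : Prop := ∀ (decorators : Option (List (List (String × String)))), Dom_build_decorator_lookup_py decorators → Spec_build_decorator_lookup_py decorators (build_decorator_lookup_py decorators)

-- ===== LEMMAS AND PROOFS =====

-- A's loop body, as one step
def pvStepA (d : PySem.Dict String (List (List (String × String)))) (dec : List (String × String)) :
    PySem.Dict String (List (List (String × String))) :=
  match pvGetPN dec with
  | none => d
  | some p =>
    if p = "" then d
    else
      let d := if d.contains p = false then d.insert p ([] : List (List (String × String))) else d
      d.modify p [] (fun l => l ++ [dec])

lemma insert_insert_self (d : PySem.Dict String (List (List (String × String)))) (p : String)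
    (hc : d.contains p = false) (v w : List (List (String × String))) :
    (d.insert p v).insert p w = d.insert p w := by
  have hmem : ∀ q ∈ d.items, (q.1 == p) = false := by
    intro q hq
    by_contra h
    have : (q.1 == p) = true := by
      cases hb : (q.1 == p) with
      | false => exact absurd hb h
      | true => rfl
    have : d.contains p = true := by
      simp only [PySem.Dict.contains, List.any_eq_true]
      exact ⟨q, hq, this⟩
    simp [this] at hc
  apply PySem.Dict.ext
  have h1 : (d.insert p v).contains p = true := PySem.Dict.contains_insert_self d p v
  simp only [PySem.Dict.insert, hc, if_false, Bool.false_eq_true]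
  simp only [List.map_append, List.map]
  have hmap : List.map (fun q => if q.1 = p then (p, w) else q) d.items = d.items := by
    conv_rhs => rw [← List.map_id d.items]
    exact List.map_congr_left (fun q hq => by
      have := hmem q hq
      simp only [beq_eq_false_iff_ne, ne_eq] at this
      simp [this])
  simp only [beq_iff_eq]
  rw [hmap]
  simp [PySem.Dict.contains]

lemma stepA_eq (d : PySem.Dict String (List (List (String × String)))) (dec : List (String × String)) :
    pvStepA d dec = if pvValid dec then d.modify (pvKey dec) [] (fun l => l ++ [dec]) else d := by
  unfold pvStepA pvValid pvKey
  cases h : pvGetPN dec with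
  | none => simp
  | some p =>
    simp only
    by_cases hp : p = ""
    · simp [hp]
    · have hb : (p == "") = false := by simp [hp]
      simp only [hp, hb, Bool.not_false, if_true, Option.getD_some]
      by_cases hc : d.contains p = false
      · simp only [hc, if_true]
        unfold PySem.Dict.modify
        rw [PySem.Dict.getD_insert_self]
        rw [PySem.Dict.getD_of_not_contains]
        · rw [insert_insert_self d p hc]
          simp
        · exact hc
      · simp [hc]

lemma fold_stepA_eq (ds : List (List (String × String)))
    (d : PySem.Dict String (List (List (String × String)))) :
    ds.foldl pvStepA d
      = ((ds.filter pvValid).map (fun x => (pvKey x, x))).foldl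
          (fun d p => d.modify p.1 [] (fun l => l ++ [p.2])) d := by
  induction ds generalizing d with
  | nil => rfl
  | cons x t ih =>
    simp only [List.foldl_cons, List.filter_cons]
    rw [stepA_eq]
    by_cases hv : pvValid x
    · simp [hv, ih]
    · simp [hv, ih]

lemma items_eq_keys_map (l : List (String × List (List (String × String))))
    (h : (l.map Prod.fst).Nodup) :
    l = (l.map Prod.fst).map (fun k => (k, (PySem.Dict.mk l).getD k [])) := by
  induction l with
  | nil => rfl
  | cons q t ih =>
    obtain ⟨k, v⟩ := q
    simp only [List.map_cons] at h ⊢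
    have hk : k ∉ t.map Prod.fst := (List.nodup_cons.mp h).1
    have ht : (t.map Prod.fst).Nodup := (List.nodup_cons.mp h).2
    have hhead : (PySem.Dict.mk ((k, v) :: t)).getD k [] = v := by
      rw [PySem.Dict.getD_eq_get?_getD, PySem.Dict.get?_mk_cons]
      simp
    have htail : (t.map Prod.fst).map (fun k' => (k', (PySem.Dict.mk ((k, v) :: t)).getD k' []))
        = (t.map Prod.fst).map (fun k' => (k', (PySem.Dict.mk t).getD k' [])) := by
      apply List.map_congr_left
      intro k' hk'
      have hne : (k == k') = false := by
        have : k' ≠ k := fun he => hk (he ▸ hk')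
        simp [this.symm]
      rw [PySem.Dict.getD_eq_get?_getD, PySem.Dict.get?_mk_cons, hne]
      rw [PySem.Dict.getD_eq_get?_getD]
      simp
    rw [htail, ← ih ht, hhead]

lemma filter_map_snd (valid : List (List (String × String))) (k : String) :
    (((valid.map (fun x => (pvKey x, x))).filter (fun p => p.1 == k)).map Prod.snd)
      = valid.filter (fun d => pvKey d == k) := by
  induction valid with
  | nil => rfl
  | cons x t ih =>
    simp only [List.map_cons, List.filter_cons]
    by_cases hx : (pvKey x == k) = true
    · simp [hx, ih]
    · simp [hx, ih]

theorem build_equiv (ds : List (List (String × String))) :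
    build_decorator_lookup_py (some ds) = build_decorator_lookup_py_alt (some ds) := by
  unfold build_decorator_lookup_py build_decorator_lookup_py_alt
  by_cases hds : ds = []
  · simp [hds]
  · simp only [hds, if_false]
    set valid := ds.filter pvValid with hvalid
    set l := valid.map (fun x => (pvKey x, x)) with hl
    have hfold : ds.foldl
        (fun result dec =>
          match pvGetPN dec with
          | none => result
          | some p =>
            if p = "" then result
            else
              let result := if result.contains p = false then result.insert p ([] : List (List (String × String))) else result
              result.modify p [] (fun l => l ++ [dec]))
        PySem.Dict.empty
        = l.foldl (fun d p => d.modify p.1 [] (fun lst => lst ++ [p.2])) PySem.Dict.empty := by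
      rw [show (fun (result : PySem.Dict String (List (List (String × String)))) dec =>
          match pvGetPN dec with
          | none => result
          | some p =>
            if p = "" then result
            else
              let result := if result.contains p = false then result.insert p ([] : List (List (String × String))) else result
              result.modify p [] (fun l => l ++ [dec])) = pvStepA from rfl]
      exact fold_stepA_eq ds PySem.Dict.empty
    rw [hfold]
    set D := l.foldl (fun d p => d.modify p.1 [] (fun lst => lst ++ [p.2])) PySem.Dict.empty with hD
    have hkeys : D.keys = PySem.List.dedup (valid.map pvKey) := by
      rw [hD, PySem.Dict.keys_foldl_modify_key]
      simp only [PySem.Dict.keys_empty]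
      rw [hl, List.map_map]
      have : (Prod.fst ∘ fun x => (pvKey x, x)) = pvKey := rfl
      rw [this]
      rw [PySem.List.dedup_eq_ofList]
      rfl
    have hnodup : D.keys.Nodup := by
      rw [hkeys]; exact PySem.List.nodup_dedup _
    have hgetD : ∀ k, D.getD k [] = valid.filter (fun d => pvKey d == k) := by
      intro k
      rw [hD, PySem.Dict.getD_foldl_modify_append]
      simp only [PySem.Dict.getD_empty, List.nil_append]
      rw [hl, filter_map_snd]
    have hkeysdef : D.keys = D.items.map Prod.fst := rfl
    have hitems := items_eq_keys_map D.items (by rw [← hkeysdef]; exact hnodup)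
    have hmk : PySem.Dict.mk D.items = D := rfl
    rw [hmk] at hitems
    rw [hitems, ← hkeysdef, hkeys]
    apply List.map_congr_left
    intro k _
    rw [hgetD k]

-- ===== VERDICT (by name: the statement is the Claim_ definition above) =====
theorem build_decorator_lookup_py_spec : Claim_equal_build_decorator_lookup_py := by
  intro decorators _
  unfold Spec_build_decorator_lookup_py
  cases decorators with
  | none => rfl
  | some ds => exact build_equiv ds
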